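-- pv_equiv track=rewrite | github.com/thegallagher/aoc2024 | day-09/solve-2.py | build_empty_blocks_list
-- ===== SOURCE A (Python) =====
-- def build_empty_blocks_list(puzzle: list[int]) -> list[tuple[int, int]]:
--     is_file = True
--     empty_blocks = []
--     position = 0
--     for value in puzzle:
--         if not is_file:
--             empty_blocks.append((position, value))
--
--         position += value
--         is_file = not is_file
--
--     return empty_blocks
-- ===== SOURCE B (Python) =====
-- def build_empty_blocks_list(puzzle: list[int]) -> list[tuple[int, int]]:
--     # prefix-sum table: positions[i] is the start position of block i
--     positions = [0]
--     pos = 0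
--     for v in puzzle:
--         pos += v
--         positions.append(pos)
--     # empty blocks are exactly the odd-indexed entries
--     return [(positions[i], puzzle[i]) for i in range(1, len(puzzle), 2)]
-- ===== Notes on version B (the rewrite author's own statement) =====
-- stated objective: alternative
-- what changed: Replaces the single alternating-flag accumulator loop by a prefix-sum position table built first, then a separate odd-index comprehension that selects the empty blocks by index parity.
import Mathlib
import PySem

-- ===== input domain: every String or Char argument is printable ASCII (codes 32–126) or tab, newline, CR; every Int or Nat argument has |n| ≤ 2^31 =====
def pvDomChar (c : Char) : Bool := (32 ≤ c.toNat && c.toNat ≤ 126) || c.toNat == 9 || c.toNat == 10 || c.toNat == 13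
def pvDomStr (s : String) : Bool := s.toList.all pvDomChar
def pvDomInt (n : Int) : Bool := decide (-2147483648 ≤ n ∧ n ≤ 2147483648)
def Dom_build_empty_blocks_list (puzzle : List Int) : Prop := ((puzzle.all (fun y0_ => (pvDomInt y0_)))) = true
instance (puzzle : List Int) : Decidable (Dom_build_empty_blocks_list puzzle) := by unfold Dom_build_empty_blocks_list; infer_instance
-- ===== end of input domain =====

-- B replaces A's alternating-flag accumulator loop by a prefix-sum position table plus
-- a separate odd-index selection pass (objective: alternative decomposition, same cost).

-- ===== PORT A =====
-- state: (is_file, empty_blocks, position)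
def build_empty_blocks_list (puzzle : List Int) : List (Int × Int) :=
  (puzzle.foldl
    (fun (s : Bool × List (Int × Int) × Int) value =>
      (!s.1, (if !s.1 then s.2.1 ++ [(s.2.2, value)] else s.2.1), s.2.2 + value))
    (true, [], 0)).2.1

-- ===== PORT B =====
-- positions = prefix-sum table (loop appending running sum), then odd-index comprehension
def build_empty_blocks_list_alt (puzzle : List Int) : List (Int × Int) :=
  let positions :=
    (puzzle.foldl (fun (s : List Int × Int) v => (s.1 ++ [s.2 + v], s.2 + v)) ([0], 0)).1
  (PySem.List.pyRange 1 (puzzle.length : Int) 2).map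
    (fun i => (PySem.List.pyGetD positions i 0, PySem.List.pyGetD puzzle i 0))

-- ===== PRECONDITION & SPEC =====
def Spec_build_empty_blocks_list (puzzle : List Int) (out : List (Int × Int)) : Prop := out = build_empty_blocks_list_alt puzzle
instance (puzzle : List Int) (out : List (Int × Int)) : Decidable (Spec_build_empty_blocks_list puzzle out) := by unfold Spec_build_empty_blocks_list; infer_instance

-- ===== CLAIM (what is proved, stated in full; the proofs are below) =====
def Claim_equal_build_empty_blocks_list : Prop := ∀ (puzzle : List Int), Dom_build_empty_blocks_list puzzle → Spec_build_empty_blocks_list puzzle (build_empty_blocks_list puzzle)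

-- ===== LEMMAS AND PROOFS =====

-- reference function: empty blocks of l when the current position is p
def pvEmpty (p : Int) (l : List Int) : List (Int × Int) :=
  match l with
  | [] => []
  | [_] => []
  | a :: b :: rest => (p + a, b) :: pvEmpty (p + a + b) rest

-- prefix sums of l continuing from p (without the leading p)
def pvPrefixes (p : Int) (l : List Int) : List Int :=
  match l with
  | [] => []
  | v :: rest => (p + v) :: pvPrefixes (p + v) rest

theorem pvA_foldl (p : Int) (l : List Int) : ∀ acc : List (Int × Int),
    (l.foldl
      (fun (s : Bool × List (Int × Int) × Int) value =>
        (!s.1, (if !s.1 then s.2.1 ++ [(s.2.2, value)] else s.2.1), s.2.2 + value))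
      (true, acc, p)).2.1 = acc ++ pvEmpty p l := by
  induction p, l using pvEmpty.induct with
  | case1 p => simp [pvEmpty]
  | case2 p a => simp [pvEmpty, List.foldl]
  | case3 p a b rest ih =>
    intro acc
    have hstep : (List.foldl
        (fun (s : Bool × List (Int × Int) × Int) value =>
          (!s.1, (if !s.1 then s.2.1 ++ [(s.2.2, value)] else s.2.1), s.2.2 + value))
        (true, acc, p) (a :: b :: rest))
        = List.foldl
        (fun (s : Bool × List (Int × Int) × Int) value =>
          (!s.1, (if !s.1 then s.2.1 ++ [(s.2.2, value)] else s.2.1), s.2.2 + value))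
        (true, acc ++ [(p + a, b)], p + a + b) rest := by
      simp [List.foldl]
    rw [hstep, ih (acc ++ [(p + a, b)]), pvEmpty]
    simp

theorem pvB_foldl (l : List Int) : ∀ (ps : List Int) (p : Int),
    (l.foldl (fun (s : List Int × Int) v => (s.1 ++ [s.2 + v], s.2 + v)) (ps, p)).1
      = ps ++ pvPrefixes p l := by
  induction l with
  | nil => simp [pvPrefixes]
  | cons v rest ih =>
    intro ps p
    simp only [List.foldl, ih, pvPrefixes, List.append_assoc, List.singleton_append]

theorem pvRange2_cons (n : Int) (hn : 0 ≤ n) :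
    PySem.List.pyRange 1 (n + 2) 2 = 1 :: (PySem.List.pyRange 1 n 2).map (· + 2) := by
  rw [PySem.List.pyRange_of_pos 1 (n + 2) (by norm_num),
      PySem.List.pyRange_of_pos 1 n (by norm_num)]
  have h1 : (1 : Int) < n + 2 := by omega
  rw [if_pos h1]
  have hcount : ((n + 2 - 1 + 2 - 1) / 2).toNat
      = ((if 1 < n then ((n - 1 + 2 - 1) / 2).toNat else 0)) + 1 := by
    split_ifs with h2 <;> omega
  rw [hcount, List.range_succ_eq_map]
  simp only [List.map_cons, List.map_map]
  congr 1

theorem pvB_sel (p : Int) (l : List Int) :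
    (PySem.List.pyRange 1 (l.length : Int) 2).map
      (fun i => (PySem.List.pyGetD (p :: pvPrefixes p l) i 0, PySem.List.pyGetD l i 0))
      = pvEmpty p l := by
  induction p, l using pvEmpty.induct with
  | case1 p => simp [PySem.List.pyRange_of_pos 1 0 (by norm_num : (0:Int) < 2), pvEmpty]
  | case2 p a =>
    simp [PySem.List.pyRange_of_pos 1 1 (by norm_num : (0:Int) < 2), pvEmpty]
  | case3 p a b rest ih =>
    have hlen : ((a :: b :: rest).length : Int) = (rest.length : Int) + 2 := by
      simp; omega
    rw [hlen, pvRange2_cons _ (by positivity), List.map_cons, List.map_map]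
    simp only [pvPrefixes, pvEmpty]
    congr 1
    · simp [PySem.List.pyGetD_ofNat']
    · rw [← ih]
      apply List.map_congr_left
      intro i hi
      have hmem := (PySem.List.mem_pyRange_iff_of_pos (by norm_num : (0:Int) < 2) i).1 hi
      have h1 : 1 ≤ i := hmem.1
      simp only [Function.comp_apply]
      have : PySem.List.pyGetD (p :: (p + a) :: (p + a + b) :: pvPrefixes (p + a + b) rest) (i + 2) 0
          = PySem.List.pyGetD ((p + a + b) :: pvPrefixes (p + a + b) rest) i 0 := by
        rw [PySem.List.pyGetD_of_nonneg _ _ (by omega),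
            PySem.List.pyGetD_of_nonneg _ _ (by omega)]
        have : (i + 2).toNat = i.toNat + 2 := by omega
        simp [this]
      rw [this]
      have : PySem.List.pyGetD (a :: b :: rest) (i + 2) 0 = PySem.List.pyGetD rest i 0 := by
        rw [PySem.List.pyGetD_of_nonneg _ _ (by omega),
            PySem.List.pyGetD_of_nonneg _ _ (by omega)]
        have : (i + 2).toNat = i.toNat + 2 := by omega
        simp [this]
      rw [this]

-- ===== VERDICT (by name: the statement is the Claim_ definition above) =====
theorem build_empty_blocks_list_spec : Claim_equal_build_empty_blocks_list := by
  intro puzzle _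
  unfold Spec_build_empty_blocks_list build_empty_blocks_list build_empty_blocks_list_alt
  rw [pvA_foldl 0 puzzle [], pvB_foldl puzzle [0] 0, List.nil_append, List.singleton_append,
    pvB_sel 0 puzzle]
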